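-- pv_equiv track=rewrite | github.com/samuelcorralesc/programacion | 8_7.py | f
-- ===== SOURCE A (Python) =====
-- def f(xi):
--     J=[1]
--     cont=0
--     while J[-1]<= xi:
--         for i in range (1,J[-1]+1):
--             if J[-1]%i==0:
--                 cont+=1
--         J.append(J[-1]+cont)
--         cont=0
--     return J
-- ===== SOURCE B (Python) =====
-- def f(xi):
--     J = [1]
--     while J[-1] <= xi:
--         n = J[-1]
--         cnt = 0
--         j = 1
--         while j * j <= n:
--             if n % j == 0:
--                 cnt += 1 if j * j == n else 2
--             j += 1
--         J.append(n + cnt)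
--     return J
-- ===== Notes on version B (the rewrite author's own statement) =====
-- stated objective: faster
-- what changed: B counts divisors of each term by trial division only up to sqrt(n), counting the paired divisor n/j at once, instead of A's scan over all i in 1..n.
import Mathlib
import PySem

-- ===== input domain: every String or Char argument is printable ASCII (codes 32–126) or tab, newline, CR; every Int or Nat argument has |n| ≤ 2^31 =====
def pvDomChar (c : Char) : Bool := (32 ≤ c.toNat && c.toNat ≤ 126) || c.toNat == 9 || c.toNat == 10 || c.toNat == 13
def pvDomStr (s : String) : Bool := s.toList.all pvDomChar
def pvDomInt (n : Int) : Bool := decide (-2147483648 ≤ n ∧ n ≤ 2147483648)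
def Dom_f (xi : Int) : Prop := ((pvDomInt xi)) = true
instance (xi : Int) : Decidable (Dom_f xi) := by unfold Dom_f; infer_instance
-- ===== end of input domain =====

-- B replaces A's divisor scan over 1..n by trial division up to sqrt(n) (counting the
-- paired divisor n/j at once): asymptotically faster per term, same return value.

-- ===== PORT A =====
-- the inner 'for i in range(1, J[-1]+1): if J[-1] % i == 0: cont += 1' loop of A
def fCont (n : Int) : Int :=
  (PySem.List.pyRange 1 (n + 1) 1).foldl
    (fun cont i => if PySem.Int.mod n i == 0 then cont + 1 else cont) 0

-- A's while loop; the fuel argument is only a totality guard (each pass increases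
-- J[-1] by cont ≥ 1, so xi.toNat passes always suffice)
def fLoop (fuel : Nat) (xi last : Int) : List Int :=
  match fuel with
  | 0 => [last]
  | fuel + 1 =>
      if last ≤ xi then last :: fLoop fuel xi (last + fCont last) else [last]

def f (xi : Int) : List Int := fLoop xi.toNat xi 1

-- ===== PORT B =====
-- B's inner 'while j*j <= n' loop; fuel is only a totality guard (j*j ≤ n forces
-- j ≤ n, so n.toNat + 1 steps always suffice)
def fCntGo (fuel : Nat) (n j cnt : Int) : Int :=
  match fuel with
  | 0 => cnt
  | fuel + 1 =>
      if j * j ≤ n then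
        fCntGo fuel n (j + 1)
          (if PySem.Int.mod n j == 0 then (if j * j == n then cnt + 1 else cnt + 2) else cnt)
      else cnt

def fCnt (n : Int) : Int := fCntGo (n.toNat + 1) n 1 0

-- B's while loop (same fuel guard as fLoop)
def fLoopB (fuel : Nat) (xi last : Int) : List Int :=
  match fuel with
  | 0 => [last]
  | fuel + 1 =>
      if last ≤ xi then last :: fLoopB fuel xi (last + fCnt last) else [last]

def f_alt (xi : Int) : List Int := fLoopB xi.toNat xi 1

-- ===== PRECONDITION & SPEC =====
def Spec_f (xi : Int) (out : List Int) : Prop := out = f_alt xi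
instance (xi : Int) (out : List Int) : Decidable (Spec_f xi out) := by unfold Spec_f; infer_instance

-- ===== CLAIM (what is proved, stated in full; the proofs are below) =====
def Claim_equal_f : Prop := ∀ (xi : Int), Dom_f xi → Spec_f xi (f xi)

-- ===== LEMMAS AND PROOFS =====

-- A's inner loop counts at least the divisor 1
theorem fCont_pos (n : Int) (h : 1 ≤ n) : 1 ≤ fCont n := by
  unfold fCont
  rw [PySem.List.foldl_if_add_one]
  have hmem : (1 : Int) ∈ PySem.List.pyRange 1 (n + 1) 1 := by
    rw [PySem.List.mem_pyRange_one]; omega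
  have : 0 < (PySem.List.pyRange 1 (n + 1) 1).countP
      (fun i => PySem.Int.mod n i == 0) := by
    rw [List.countP_pos_iff]
    refine ⟨1, hmem, ?_⟩
    simp
  omega

-- the set of divisors of m, and the 'small' divisors (≤ sqrt m)
def dset (m : Nat) : Finset Nat := (Finset.Icc 1 m).filter (fun d => d ∣ m)
def sset (m : Nat) : Finset Nat := (Finset.Icc 1 (Nat.sqrt m)).filter (fun d => d ∣ m)

theorem countP_range_eq (m : Nat) (p : Nat → Bool) :
    (List.range m).countP p = ((Finset.range m).filter (fun k => p k = true)).card := by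
  induction m with
  | zero => simp
  | succ m ih =>
      rw [List.range_succ, List.countP_append, Finset.range_add_one, Finset.filter_insert]
      have hnm : m ∉ (Finset.range m).filter (fun k => p k = true) := by simp
      cases h : p m <;> simp [h, ih, Finset.card_insert_of_notMem hnm]

-- A's inner loop counts the divisors of m
theorem fCont_eq_card (m : Nat) (hm : 1 ≤ m) :
    fCont (m : Int) = ((dset m).card : Int) := by
  unfold fCont
  rw [PySem.List.foldl_if_add_one, PySem.List.pyRange_one]
  have h1 : ((m : Int) + 1 - 1).toNat = m := by omega
  rw [h1, List.countP_map, countP_range_eq]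
  have h2 : ∀ k : Nat, ((fun i => PySem.Int.mod (m : Int) i == 0) ∘ fun k : Nat => (1 : Int) + k) k = true ↔ (k + 1) ∣ m := by
    intro k
    simp only [Function.comp, beq_iff_eq, PySem.Int.mod_eq_zero_iff_dvd]
    have : (1 : Int) + (k : Int) = ((k + 1 : Nat) : Int) := by push_cast; ring
    rw [this, Int.natCast_dvd_natCast]
  have h3 : ((Finset.range m).filter
      (fun k => ((fun i => PySem.Int.mod (m : Int) i == 0) ∘ fun k : Nat => (1 : Int) + k) k = true)).card
      = (dset m).card := by
    apply Finset.card_bij (fun k _ => k + 1)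
    · intro k hk
      simp only [Finset.mem_filter, Finset.mem_range] at hk
      obtain ⟨hk1, hk2⟩ := hk
      rw [h2 k] at hk2
      simp only [dset, Finset.mem_filter, Finset.mem_Icc]
      exact ⟨⟨by omega, by omega⟩, hk2⟩
    · intro a _ b _ hab; omega
    · intro d hd
      simp only [dset, Finset.mem_filter, Finset.mem_Icc] at hd
      refine ⟨d - 1, ?_, by omega⟩
      simp only [Finset.mem_filter, Finset.mem_range]
      constructor
      · omega
      · rw [h2]
        have : d - 1 + 1 = d := by omega
        rw [this]; exact hd.2
  rw [h3]; simp

-- past sqrt n there are no small divisors left to count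
theorem icc_nil (n j : Int) (hn : 1 ≤ n) (hj : 1 ≤ j) (hjj : n < j * j) :
    (Finset.Icc j.toNat (Nat.sqrt n.toNat)).filter (fun d => d ∣ n.toNat) = ∅ := by
  have h1 : ((j.toNat : Int)) = j := Int.toNat_of_nonneg (by omega)
  have h2 : ((n.toNat : Int)) = n := Int.toNat_of_nonneg (by omega)
  have hlt : Nat.sqrt n.toNat < j.toNat := by
    apply Nat.sqrt_lt.mpr
    rw [← h1, ← h2] at hjj; exact_mod_cast hjj
  rw [Finset.Icc_eq_empty (by omega), Finset.filter_empty]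

-- B's inner loop: weighted count over small divisors (fuel large enough to pass sqrt n)
theorem fCntGo_eq (n : Int) (hn : 1 ≤ n) (fuel : Nat) (j cnt : Int) (hj : 1 ≤ j)
    (hfuel : n < (j + fuel) * (j + fuel)) :
    fCntGo fuel n j cnt = cnt +
      ((∑ d ∈ (Finset.Icc j.toNat (Nat.sqrt n.toNat)).filter (fun d => d ∣ n.toNat),
        (if d * d = n.toNat then 1 else 2) : Nat) : Int) := by
  induction fuel generalizing j cnt with
  | zero =>
      simp only [Nat.cast_zero, add_zero] at hfuel
      rw [icc_nil n j hn hj hfuel, Finset.sum_empty]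
      simp [fCntGo]
  | succ fuel ih =>
      rw [fCntGo]
      by_cases hjj : j * j ≤ n
      · rw [if_pos hjj]
        have h1 : ((j.toNat : Int)) = j := Int.toNat_of_nonneg (by omega)
        have h2 : ((n.toNat : Int)) = n := Int.toNat_of_nonneg (by omega)
        have hle : j.toNat * j.toNat ≤ n.toNat := by
          have := hjj; rw [← h1, ← h2] at this; exact_mod_cast this
        have hjs : j.toNat ≤ Nat.sqrt n.toNat := Nat.le_sqrt.mpr hle
        have hsplit : Finset.Icc j.toNat (Nat.sqrt n.toNat)
            = insert j.toNat (Finset.Icc (j.toNat + 1) (Nat.sqrt n.toNat)) := by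
          ext x; simp only [Finset.mem_Icc, Finset.mem_insert]; omega
        have hfuel' : n < (j + 1 + fuel) * (j + 1 + fuel) := by
          have hc : j + 1 + (fuel : Int) = j + ((fuel + 1 : Nat) : Int) := by push_cast; ring
          rw [hc]; exact hfuel
        have h3 : (j + 1).toNat = j.toNat + 1 := by omega
        have ihj := fun cnt' => ih (j + 1) cnt' (by omega) hfuel'
        rw [h3] at ihj
        have hnotmem : j.toNat ∉ (Finset.Icc (j.toNat + 1) (Nat.sqrt n.toNat)).filter
            (fun d => d ∣ n.toNat) := by simp
        have hmod : (PySem.Int.mod n j == 0) = true ↔ j.toNat ∣ n.toNat := by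
          simp only [beq_iff_eq, PySem.Int.mod_eq_zero_iff_dvd]
          conv_lhs => rw [← h1, ← h2]
          exact Int.natCast_dvd_natCast
        have hsq : (j * j == n) = true ↔ j.toNat * j.toNat = n.toNat := by
          simp only [beq_iff_eq]
          conv_lhs => rw [← h1, ← h2]
          exact_mod_cast Iff.rfl
        split_ifs with hmb hsb
        · rw [hsplit, Finset.filter_insert, if_pos (hmod.mp hmb),
              Finset.sum_insert hnotmem, if_pos (hsq.mp hsb), ihj]
          push_cast; ring
        · rw [hsplit, Finset.filter_insert, if_pos (hmod.mp hmb),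
              Finset.sum_insert hnotmem, if_neg (fun hh => hsb (hsq.mpr hh)), ihj]
          push_cast; ring
        · rw [hsplit, Finset.filter_insert, if_neg (fun hh => hmb (hmod.mpr hh)), ihj]
      · rw [if_neg hjj]
        rw [icc_nil n j hn hj (by omega), Finset.sum_empty]
        simp

-- the sqrt pairing: each divisor above sqrt m pairs with the divisor m / d below it
theorem pairing (m : Nat) (hm : 1 ≤ m) :
    ((dset m).filter (fun d => ¬ d * d ≤ m)).card
      = ((dset m).filter (fun d => d * d ≤ m ∧ ¬ d * d = m)).card := by
  apply Finset.card_bij' (fun d _ => m / d) (fun e _ => m / e)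
  · intro d hd
    simp only [dset, Finset.mem_filter, Finset.mem_Icc, not_le, and_assoc] at hd ⊢
    obtain ⟨hd1, hd2, hdvd, hbig⟩ := hd
    obtain ⟨c, hc⟩ := hdvd
    subst hc
    have hd0 : 0 < d := by omega
    have hc0 : 0 < c := Nat.pos_of_ne_zero (by rintro rfl; simp at hm)
    rw [Nat.mul_div_cancel_left c hd0]
    have hcd : c < d := Nat.lt_of_mul_lt_mul_left hbig
    have hlt : c * c < d * c := mul_lt_mul_of_pos_right hcd hc0
    exact ⟨hc0, Nat.le_mul_of_pos_left c hd0, dvd_mul_left c d,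
      le_of_lt (by linarith [hlt]), by intro hh; omega⟩
  · intro e he
    simp only [dset, Finset.mem_filter, Finset.mem_Icc, not_le, and_assoc] at he ⊢
    obtain ⟨he1, he2, hdvd, hsmall, hne⟩ := he
    obtain ⟨c, hc⟩ := hdvd
    subst hc
    have he0 : 0 < e := by omega
    have hc0 : 0 < c := Nat.pos_of_ne_zero (by rintro rfl; simp at hm)
    rw [Nat.mul_div_cancel_left c he0]
    have hec : e < c := Nat.lt_of_mul_lt_mul_left (lt_of_le_of_ne hsmall hne)
    have hlt : e * c < c * c := mul_lt_mul_of_pos_right hec hc0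
    exact ⟨hc0, Nat.le_mul_of_pos_left c he0, dvd_mul_left c e, by linarith [hlt]⟩
  · intro d hd
    simp only [dset, Finset.mem_filter, Finset.mem_Icc, and_assoc] at hd
    obtain ⟨hd1, hd2, hdvd, hbig⟩ := hd
    obtain ⟨c, hc⟩ := hdvd
    subst hc
    have hd0 : 0 < d := by omega
    have hc0 : 0 < c := Nat.pos_of_ne_zero (by rintro rfl; simp at hm)
    rw [Nat.mul_div_cancel_left c hd0, Nat.mul_div_cancel _ hc0]
  · intro e he
    simp only [dset, Finset.mem_filter, Finset.mem_Icc, and_assoc] at he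
    obtain ⟨he1, he2, hdvd, hrest⟩ := he
    obtain ⟨c, hc⟩ := hdvd
    subst hc
    have he0 : 0 < e := by omega
    have hc0 : 0 < c := Nat.pos_of_ne_zero (by rintro rfl; simp at hm)
    rw [Nat.mul_div_cancel_left c he0, Nat.mul_div_cancel _ hc0]

-- the divisor count as a weighted sum over small divisors
theorem card_eq_sum (m : Nat) (hm : 1 ≤ m) :
    (dset m).card = ∑ d ∈ sset m, (if d * d = m then 1 else 2) := by
  have hs : sset m = (dset m).filter (fun d => d * d ≤ m) := by
    ext d
    simp only [sset, dset, Finset.mem_filter, Finset.mem_Icc]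
    constructor
    · rintro ⟨⟨h1, h2⟩, h3⟩
      exact ⟨⟨⟨h1, Nat.le_of_dvd hm h3⟩, h3⟩, Nat.le_sqrt.mp h2⟩
    · rintro ⟨⟨⟨h1, h2⟩, h3⟩, h4⟩
      exact ⟨⟨h1, Nat.le_sqrt.mpr h4⟩, h3⟩
  have hterm : ∀ d ∈ (dset m).filter (fun d => d * d ≤ m),
      (if d * d = m then 1 else 2) = 1 + (if ¬ d * d = m then 1 else 0) := by
    intro d _; by_cases h : d * d = m <;> simp [h]
  rw [hs, Finset.sum_congr rfl hterm, Finset.sum_add_distrib, Finset.sum_const,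
      smul_eq_mul, mul_one, Finset.sum_boole, Finset.filter_filter]
  simp only [Nat.cast_id]
  have hcard := Finset.card_filter_add_card_filter_not
    (s := dset m) (p := fun d => d * d ≤ m)
  have hpair := pairing m hm
  omega

-- KEY LEMMA: both inner loops compute the number of divisors
theorem count_eq (n : Int) (h : 1 ≤ n) : fCont n = fCnt n := by
  have hm : 1 ≤ n.toNat := by omega
  have hn : ((n.toNat : Nat) : Int) = n := by omega
  have hA : fCont n = ((dset n.toNat).card : Int) := by
    rw [← hn]; exact fCont_eq_card n.toNat hm
  have hB : fCnt n = ((∑ d ∈ sset n.toNat, (if d * d = n.toNat then 1 else 2) : Nat) : Int) := by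
    unfold fCnt
    rw [fCntGo_eq n h (n.toNat + 1) 1 0 (le_refl 1) (by push_cast; nlinarith [hn])]
    simp [sset, Int.toNat_one]
  rw [hA, hB, card_eq_sum n.toNat hm]

-- the two while loops agree step by step once the inner counts agree
theorem loop_eq (fuel : Nat) (xi last : Int) (h : 1 ≤ last) :
    fLoop fuel xi last = fLoopB fuel xi last := by
  induction fuel generalizing last with
  | zero => rfl
  | succ fuel ih =>
      rw [fLoop, fLoopB, ← count_eq last h]
      by_cases hle : last ≤ xi
      · rw [if_pos hle, if_pos hle, ih (last + fCont last) (by have := fCont_pos last h; omega)]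
      · rw [if_neg hle, if_neg hle]

-- ===== VERDICT (by name: the statement is the Claim_ definition above) =====
theorem f_spec : Claim_equal_f := by
  intro xi _
  unfold Spec_f f f_alt
  exact loop_eq xi.toNat xi 1 (le_refl 1)
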